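-- pv_equiv track=rewrite | github.com/kchandra423/Segregation-Analyzer | Loading/put_school_data.py | index_json_raw
-- ===== SOURCE A (Python) =====
-- def index_json_raw(blocks):
--     index = {}
--     for block in blocks:
--         if block['STATEA'] not in index.keys():
--             index[block['STATEA']] = {}
--         state = index[block['STATEA']]
--         if block['COUNTYA'] not in state.keys():
--             state[block['COUNTYA']] = {}
--         county = state[block['COUNTYA']]
--         if block['TRACTA'] not in county.keys():
--             county[block['TRACTA']] = []
--         tract = county[block['TRACTA']]
--         tract.append(block)
--     return index
-- ===== SOURCE B (Python) =====
-- def _group(bs, key):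
--     order = []
--     for b in bs:
--         k = b[key]
--         if k not in order:
--             order.append(k)
--     return [(k, [b for b in bs if b[key] == k]) for k in order]
--
--
-- def index_json_raw(blocks):
--     return {s: {c: dict(_group(cb, 'TRACTA'))
--                 for c, cb in _group(sb, 'COUNTYA')}
--             for s, sb in _group(blocks, 'STATEA')}
-- ===== Notes on version B (the rewrite author's own statement) =====
-- stated objective: alternative
-- what changed: A's single pass that inserts empty sub-dicts on first sight and appends to a mutated leaf list is replaced by a group-by-first-appearance pipeline: per level, a dedup'd key-order list plus one filter per key, composed over the three levels by nested comprehensions.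
import Mathlib
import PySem

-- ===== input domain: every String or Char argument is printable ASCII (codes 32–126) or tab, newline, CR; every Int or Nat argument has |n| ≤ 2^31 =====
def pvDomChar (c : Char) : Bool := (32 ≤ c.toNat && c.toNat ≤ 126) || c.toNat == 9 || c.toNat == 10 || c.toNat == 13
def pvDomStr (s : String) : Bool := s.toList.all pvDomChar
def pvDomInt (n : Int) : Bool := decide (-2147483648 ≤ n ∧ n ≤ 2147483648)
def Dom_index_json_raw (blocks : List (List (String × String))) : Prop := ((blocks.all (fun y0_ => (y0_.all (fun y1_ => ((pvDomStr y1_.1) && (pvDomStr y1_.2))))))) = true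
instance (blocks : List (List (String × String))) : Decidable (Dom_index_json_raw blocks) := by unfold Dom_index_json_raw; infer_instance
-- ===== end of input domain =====

-- B replaces A's per-block insert-if-absent mutation pass by group-by-first-appearance:
-- a dedup'd key order per level plus a filter per key (objective: alternative, not faster).
-- A mutates only the dict it builds, never its argument; the equivalence is about the return value.

-- Python dicts are assoc lists here; these wrappers are PySem.Dict's get?/getD/insert on the raw item list.
def pvGet? {α : Type} (d : List (String × α)) (k : String) : Option α := (PySem.Dict.mk d).get? k
def pvGetD {α : Type} (d : List (String × α)) (k : String) (dflt : α) : α := (PySem.Dict.mk d).getD k dflt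
def pvIns {α : Type} (d : List (String × α)) (k : String) (v : α) : List (String × α) := ((PySem.Dict.mk d).insert k v).items

-- ===== PORT A =====
-- block['K'] raises KeyError when the key is absent: Pre_ excludes that; pvGetD … "" is the total stand-in.
-- Python mutates state/county/tract in place through aliases; the functional port writes each mutated
-- inner dict back with an overwrite-in-place insert (pvIns), which is exactly what the aliasing amounts to.
def index_json_raw (blocks : List (List (String × String))) : List (String × List (String × List (String × List (List (String × String))))) :=
  blocks.foldl (fun index block =>
    let sA := pvGetD block "STATEA" ""
    let cA := pvGetD block "COUNTYA" ""
    let tA := pvGetD block "TRACTA" ""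
    let index := if (pvGet? index sA).isNone then pvIns index sA [] else index
    let state := pvGetD index sA []
    let state := if (pvGet? state cA).isNone then pvIns state cA [] else state
    let county := pvGetD state cA []
    let county := if (pvGet? county tA).isNone then pvIns county tA [] else county
    let tract := pvGetD county tA []
    let tract := tract ++ [block]
    let county := pvIns county tA tract
    let state := pvIns state cA county
    pvIns index sA state) []

-- ===== PORT B =====
-- _group's 'order' loop: append each block's key if unseen (a list used as an ordered set)
def pvOrder (key : String) (bs : List (List (String × String))) : List String :=
  bs.foldl (fun order b => PySem.Set.add order (pvGetD b key "")) []

-- _group's result: [(k, [b for b in bs if b[key] == k]) for k in order]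
def pvGroup (key : String) (bs : List (List (String × String))) : List (String × List (List (String × String))) :=
  (pvOrder key bs).map (fun k => (k, bs.filter (fun b => pvGetD b key "" == k)))

def index_json_raw_alt (blocks : List (List (String × String))) : List (String × List (String × List (String × List (List (String × String))))) :=
  (pvGroup "STATEA" blocks).map (fun p => (p.1,
    (pvGroup "COUNTYA" p.2).map (fun q => (q.1,
      pvGroup "TRACTA" q.2))))

-- ===== PRECONDITION & SPEC =====
-- Pre_: exactly the inputs on which A returns — every block carries the three keys (else Python raises KeyError).
def Pre_index_json_raw (blocks : List (List (String × String))) : Prop :=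
  ∀ b ∈ blocks, (pvGet? b "STATEA").isSome = true ∧ (pvGet? b "COUNTYA").isSome = true ∧ (pvGet? b "TRACTA").isSome = true
instance (blocks : List (List (String × String))) : Decidable (Pre_index_json_raw blocks) := by unfold Pre_index_json_raw; infer_instance
def pvWitness_index_json_raw : (List (List (String × String))) :=
  [[("STATEA", "06"), ("COUNTYA", "001"), ("TRACTA", "42")],
   [("STATEA", "06"), ("COUNTYA", "001"), ("TRACTA", "42")],
   [("STATEA", "06"), ("COUNTYA", "003"), ("TRACTA", "1")]]

-- instance search does not reach this deeply nested DecidableEq by itself; spelled out once, used by the Spec_ instance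
def pvDecEqOut : DecidableEq (List (String × List (String × List (String × List (List (String × String)))))) :=
  @instDecidableEqList _ (@instDecidableEqProd _ _ _ (@instDecidableEqList _ (@instDecidableEqProd _ _ _ (@instDecidableEqList _ (@instDecidableEqProd _ _ _ (@instDecidableEqList _ (@instDecidableEqList _ (@instDecidableEqProd _ _ _ _))))))))

def Spec_index_json_raw (blocks : List (List (String × String))) (out : List (String × List (String × List (String × List (List (String × String)))))) : Prop := out = index_json_raw_alt blocks
instance (blocks : List (List (String × String))) (out : List (String × List (String × List (String × List (List (String × String)))))) : Decidable (Spec_index_json_raw blocks out) := by unfold Spec_index_json_raw; exact pvDecEqOut out (index_json_raw_alt blocks)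

-- ===== CLAIM (what is proved, stated in full; the proofs are below) =====
def Claim_equal_index_json_raw : Prop := ∀ (blocks : List (List (String × String))), Dom_index_json_raw blocks → Pre_index_json_raw blocks → Spec_index_json_raw blocks (index_json_raw blocks)

-- ===== LEMMAS AND PROOFS =====
def pvKey (key : String) (b : List (String × String)) : String := pvGetD b key ""

-- one level of A's loop body, payload-generic: ensure the key exists, then write back the updated entry
def pvStep {γ : Type} (key : String) (init : γ) (g : γ → List (String × String) → γ)
    (b : List (String × String)) (d : List (String × γ)) : List (String × γ) :=
  let k := pvKey key b
  let d1 := if (pvGet? d k).isNone then pvIns d k init else d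
  pvIns d1 k (g (pvGetD d1 k init) b)

-- one level of B, payload-generic
def pvGroupMap {γ : Type} (key : String) (f : List (List (String × String)) → γ)
    (bs : List (List (String × String))) : List (String × γ) :=
  (pvOrder key bs).map (fun k => (k, f (bs.filter (fun b => pvKey key b == k))))

lemma pvOrder_eq_ofList (key : String) (bs : List (List (String × String))) :
    pvOrder key bs = PySem.Set.ofList (bs.map (pvKey key)) := by
  rw [pvOrder, ← PySem.Set.update_map_eq_foldl_add, PySem.Set.update_nil_left]
  rfl

lemma mem_pvOrder (key : String) (bs : List (List (String × String))) (k : String) :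
    k ∈ pvOrder key bs ↔ ∃ b ∈ bs, pvKey key b = k := by
  rw [pvOrder_eq_ofList]
  simp [PySem.Set.mem_ofList, eq_comm]

lemma pvOrder_snoc (key : String) (bs : List (List (String × String))) (b : List (String × String)) :
    pvOrder key (bs ++ [b]) =
      if (pvOrder key bs).contains (pvKey key b) then pvOrder key bs
      else pvOrder key bs ++ [pvKey key b] := by
  simp [pvOrder, List.foldl_append, PySem.Set.add, PySem.Set.contains, pvKey]

lemma pvGet?_map {α : Type} (l : List String) (h : String → α) (k0 : String) :
    pvGet? (l.map (fun k => (k, h k))) k0 = if l.contains k0 then some (h k0) else none := by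
  induction l with
  | nil => rfl
  | cons x xs ih =>
    simp only [List.map_cons, pvGet?, PySem.Dict.get?_mk_cons, List.contains_cons] at *
    by_cases hx : x = k0
    · subst hx; simp
    · have hb : (x == k0) = false := beq_eq_false_iff_ne.mpr hx
      have hb' : (k0 == x) = false := beq_eq_false_iff_ne.mpr (Ne.symm hx)
      simp only [hb, hb', Bool.false_or, Bool.false_eq_true, if_false]
      exact ih

lemma pvContains_map {α : Type} (l : List String) (h : String → α) (k0 : String) :
    (PySem.Dict.mk (l.map (fun k => (k, h k)))).contains k0 = l.contains k0 := by
  rw [PySem.Dict.contains_eq_isSome_get?]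
  show (pvGet? (l.map (fun k => (k, h k))) k0).isSome = _
  rw [pvGet?_map]
  by_cases hm : k0 ∈ l <;> simp [hm]

lemma pvGetD_map {α : Type} (l : List String) (h : String → α) (k0 : String) (dflt : α)
    (hc : l.contains k0 = true) :
    pvGetD (l.map (fun k => (k, h k))) k0 dflt = h k0 := by
  show (PySem.Dict.mk (l.map (fun k => (k, h k)))).getD k0 dflt = _
  rw [PySem.Dict.getD_eq_get?_getD]
  show (pvGet? (l.map (fun k => (k, h k))) k0).getD dflt = _
  rw [pvGet?_map, if_pos hc]
  rfl

lemma pvIns_map_of_contains {α : Type} (l : List String) (h : String → α) (k0 : String) (v : α)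
    (hc : l.contains k0 = true) :
    pvIns (l.map (fun k => (k, h k))) k0 v = l.map (fun k => (k, if k == k0 then v else h k)) := by
  rw [pvIns, PySem.Dict.items_insert_of_contains _ _ (by rw [pvContains_map]; exact hc)]
  show (l.map (fun k => (k, h k))).map _ = _
  rw [List.map_map]
  apply List.map_congr_left
  intro k _
  by_cases hk : k = k0
  · subst hk; simp
  · simp [beq_eq_false_iff_ne.mpr hk, hk]

lemma pvIns_map_of_not_contains {α : Type} (l : List String) (h : String → α) (k0 : String) (v : α)
    (hc : l.contains k0 = false) :
    pvIns (l.map (fun k => (k, h k))) k0 v = l.map (fun k => (k, h k)) ++ [(k0, v)] := by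
  rw [pvIns, PySem.Dict.items_insert_of_not_contains _ _ (by rw [pvContains_map]; exact hc)]

-- B's one level absorbs one trailing block exactly like A's one step, provided the payloads do
lemma pvGroupMap_snoc {γ : Type} (key : String) (init : γ)
    (f : List (List (String × String)) → γ) (g : γ → List (String × String) → γ)
    (hnil : f [] = init)
    (hsnoc : ∀ bs b', f (bs ++ [b']) = g (f bs) b')
    (bs : List (List (String × String))) (b : List (String × String)) :
    pvGroupMap key f (bs ++ [b]) = pvStep key init g b (pvGroupMap key f bs) := by
  set k := pvKey key b with hk
  have hfilter : ∀ k' : String,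
      (bs ++ [b]).filter (fun b' => pvKey key b' == k') =
        bs.filter (fun b' => pvKey key b' == k') ++ (if k == k' then [b] else []) := by
    intro k'
    rw [List.filter_append]
    simp only [List.filter_cons, List.filter_nil]
    by_cases h : k = k'
    · simp [← hk, h]
    · have hb : (k == k') = false := beq_eq_false_iff_ne.mpr h
      simp [← hk, hb]
  by_cases hc : (pvOrder key bs).contains k
  · -- key already present: order unchanged, that entry gains one trailing block
    have hgd : pvGet? (pvGroupMap key f bs) k =
        some (f (bs.filter (fun b' => pvKey key b' == k))) := by
      rw [pvGroupMap, pvGet?_map, if_pos hc]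
    rw [pvStep]
    rw [← hk]
    simp only [hgd]
    simp only [Option.isNone_some, Bool.false_eq_true, if_false]
    simp only [pvGroupMap]
    rw [pvGetD_map _ _ _ _ hc, pvIns_map_of_contains _ _ _ _ hc]
    rw [pvOrder_snoc, ← hk, if_pos hc]
    apply List.map_congr_left
    intro k' _
    by_cases h : k' = k
    · subst h
      rw [hfilter k, if_pos (by simp), hsnoc]
      simp
    · have hb : (k' == k) = false := beq_eq_false_iff_ne.mpr h
      have hb' : (k == k') = false := beq_eq_false_iff_ne.mpr (Ne.symm h)
      simp only [hb, Bool.false_eq_true, if_false, hfilter k', hb', List.append_nil]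
  · -- fresh key: appended at the end, with payload g init b
    have hcf : (pvOrder key bs).contains k = false := by
      revert hc; cases (pvOrder key bs).contains k <;> simp
    have hnotmem : k ∉ pvOrder key bs := by
      simpa using hcf
    have hfilter_nil : bs.filter (fun b' => pvKey key b' == k) = [] := by
      rw [List.filter_eq_nil_iff]
      intro b' hb' hbeq
      exact hnotmem ((mem_pvOrder key bs k).2 ⟨b', hb', by exact (beq_iff_eq).1 hbeq⟩)
    have hgd : pvGet? (pvGroupMap key f bs) k = none := by
      rw [pvGroupMap, pvGet?_map, hcf]
      rfl
    rw [pvStep]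
    rw [← hk]
    simp only [hgd]
    simp only [Option.isNone_none, if_true]
    simp only [pvGroupMap]
    rw [pvIns_map_of_not_contains _ _ _ _ hcf]
    have hd1 : (pvOrder key bs).map (fun k' => (k', f (bs.filter (fun b' => pvKey key b' == k')))) ++ [(k, init)] =
        ((pvOrder key bs) ++ [k]).map
          (fun k' => (k', if k' == k then init else f (bs.filter (fun b' => pvKey key b' == k')))) := by
      rw [List.map_append, List.map_cons, List.map_nil]
      congr 1
      · apply List.map_congr_left
        intro k' hk'
        have hb : (k' == k) = false := beq_eq_false_iff_ne.mpr (fun he => hnotmem (he ▸ hk'))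
        simp [hb]
      · simp
    rw [hd1]
    have hcontains2 : ((pvOrder key bs) ++ [k]).contains k = true := by
      simp
    rw [pvGetD_map _ _ _ _ hcontains2, pvIns_map_of_contains _ _ _ _ hcontains2]
    simp only [BEq.rfl, if_true]
    rw [pvOrder_snoc, ← hk, if_neg (by simpa using hnotmem)]
    apply List.map_congr_left
    intro k' hk'
    by_cases h : k' = k
    · subst h
      rw [hfilter k, if_pos (by simp), hfilter_nil, hsnoc, hnil]
      simp
    · have hb : (k' == k) = false := beq_eq_false_iff_ne.mpr h
      have hb' : (k == k') = false := beq_eq_false_iff_ne.mpr (Ne.symm h)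
      simp only [hb, Bool.false_eq_true, if_false, hfilter k', hb', List.append_nil]

-- the nested payloads of B, named so the snoc lemma composes level by level
def pvF3 : List (List (String × String)) → List (String × List (List (String × String))) :=
  pvGroupMap "TRACTA" id

def pvF2 : List (List (String × String)) → List (String × List (String × List (List (String × String)))) :=
  pvGroupMap "COUNTYA" pvF3

lemma pvF3_snoc (bs : List (List (String × String))) (b : List (String × String)) :
    pvF3 (bs ++ [b]) = pvStep "TRACTA" [] (fun l b' => l ++ [b']) b (pvF3 bs) :=
  pvGroupMap_snoc "TRACTA" [] id (fun l b' => l ++ [b']) rfl (fun _ _ => rfl) bs b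

lemma pvF2_snoc (bs : List (List (String × String))) (b : List (String × String)) :
    pvF2 (bs ++ [b]) =
      pvStep "COUNTYA" [] (fun d b' => pvStep "TRACTA" [] (fun l b'' => l ++ [b'']) b' d) b (pvF2 bs) :=
  pvGroupMap_snoc "COUNTYA" [] pvF3 _ rfl pvF3_snoc bs b

-- A's whole loop body is the three-level nested generic step (definitional)
lemma foldlA_snoc (bs : List (List (String × String))) (b : List (String × String)) :
    index_json_raw (bs ++ [b]) =
      pvStep "STATEA" []
        (fun d b' => pvStep "COUNTYA" [] (fun d' b'' => pvStep "TRACTA" [] (fun l b''' => l ++ [b''']) b'' d') b' d)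
        b (index_json_raw bs) := by
  rw [index_json_raw, index_json_raw, List.foldl_append]
  rfl

lemma foldlA_eq_groupMap (bs : List (List (String × String))) :
    index_json_raw bs = pvGroupMap "STATEA" pvF2 bs := by
  induction bs using List.reverseRecOn with
  | nil => rfl
  | append_singleton bs b ih =>
    rw [foldlA_snoc, ih, ← pvGroupMap_snoc "STATEA" [] pvF2 _ rfl pvF2_snoc bs b]

lemma pvGroup_eq_groupMap (key : String) (bs : List (List (String × String))) :
    pvGroup key bs = pvGroupMap key id bs := rfl

lemma alt_eq_groupMap (bs : List (List (String × String))) :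
    index_json_raw_alt bs = pvGroupMap "STATEA" pvF2 bs := by
  simp only [index_json_raw_alt, pvGroup_eq_groupMap, pvF2, pvF3, pvGroupMap, List.map_map]
  apply List.map_congr_left
  intro k _
  rfl

-- ===== VERDICT (by name: the statement is the Claim_ definition above) =====
theorem index_json_raw_spec : Claim_equal_index_json_raw := by
  intro blocks _ _
  show index_json_raw blocks = index_json_raw_alt blocks
  rw [foldlA_eq_groupMap, alt_eq_groupMap]
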